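-- pv_equiv track=rewrite | github.com/haunglai/odpython | 11/考勤信息/考勤信息.py | check
-- ===== SOURCE A (Python) =====
-- def check(s):
--     a = ['late', 'leaveearly']
--     for i in a:
--         for j in a:
--             if s.find(i + ' ' + j) != -1:
--                 return False
--             elif s.find(j + ' ' + i) != -1:
--                 return False
--     logs = s.split()
--     m = len(logs)
--     cnt = 0
--     for i in logs:
--         if i == 'absent':
--             cnt += 1
--     if cnt > 1:
--         return False
--     for i in range(m):
--         cnt = 0
--         for j in range(i, min(i + 7, m)):
--             if logs[j] in ['absent', 'leaveearly', 'late']: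
--                 cnt += 1
--         if cnt > 3:
--             return False
--     return True
-- ===== SOURCE B (Python) =====
-- def check(s):
--     for pat in ('late late', 'late leaveearly', 'leaveearly late', 'leaveearly leaveearly'):
--         if pat in s:
--             return False
--     logs = s.split()
--     if logs.count('absent') > 1:
--         return False
--     bad = [1 if w in ('absent', 'leaveearly', 'late') else 0 for w in logs]
--     P = [0]
--     for b in bad:
--         P.append(P[-1] + b)
--     m = len(logs)
--     return all(P[min(i + 7, m)] - P[i] <= 3 for i in range(m))
-- ===== Notes on version B (the rewrite author's own statement) =====
-- stated objective: alternative
-- what changed: The nested per-position re-summing of each 7-log window is replaced by a prefix-sum table (window count = P[min(i+7,m)]-P[i]), the absent loop by list.count, and the pair loops by the four explicit substring tests.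
import Mathlib
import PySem

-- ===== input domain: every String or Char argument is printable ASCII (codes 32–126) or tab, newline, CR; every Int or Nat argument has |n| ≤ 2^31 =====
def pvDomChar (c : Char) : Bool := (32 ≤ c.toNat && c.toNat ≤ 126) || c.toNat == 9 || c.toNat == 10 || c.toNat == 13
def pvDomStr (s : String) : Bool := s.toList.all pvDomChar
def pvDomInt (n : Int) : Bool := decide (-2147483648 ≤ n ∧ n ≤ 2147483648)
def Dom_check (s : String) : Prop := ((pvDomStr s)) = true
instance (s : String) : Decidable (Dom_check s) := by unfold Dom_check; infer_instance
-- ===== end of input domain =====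

-- B replaces A's per-position re-summed 7-log window by a prefix-sum table, the absent loop by list.count, and the pair loops by four explicit substring tests (objective: alternative).

-- ===== PORT A =====
def check (s : String) : Bool :=
  -- for i in a: for j in a: early-return False on a found pair  → any
  if (["late", "leaveearly"]).any (fun i => (["late", "leaveearly"]).any (fun j =>
      (PySem.Str.find s (i ++ " " ++ j) != -1) || (PySem.Str.find s (j ++ " " ++ i) != -1)))
  then false
  else
    let logs := PySem.Str.split₀ s
    let m := logs.length
    let cnt : Int := logs.foldl (fun c i => if i == "absent" then c + 1 else c) 0
    if cnt > 1 then false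
    else if (PySem.List.pyRange 0 (m : Int) 1).any (fun i =>
        ((PySem.List.pyRange i (min (i + 7) (m : Int)) 1).foldl (fun c j =>
          if PySem.List.pyGetD logs j "" ∈ ["absent", "leaveearly", "late"] then c + 1 else c)
          (0 : Int)) > 3)
    then false else true

-- ===== PORT B =====
def check_alt (s : String) : Bool :=
  if (["late late", "late leaveearly", "leaveearly late", "leaveearly leaveearly"]).any
       (fun p => PySem.Str.isIn p s)
  then false
  else
    let logs := PySem.Str.split₀ s
    if PySem.List.count logs "absent" > 1 then false
    else
      let bad : List Int := logs.map (fun w => if w ∈ ["absent", "leaveearly", "late"] then 1 else 0)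
      let P : List Int := bad.foldl (fun acc b => acc ++ [PySem.List.pyGetD acc (-1) 0 + b]) [0]
      let m := logs.length
      (List.range m).all (fun i =>
        PySem.List.pyGetD P (min ((i : Int) + 7) (m : Int)) 0 - PySem.List.pyGetD P (i : Int) 0 ≤ 3)

-- ===== PRECONDITION & SPEC =====
def Spec_check (s : String) (out : Bool) : Prop := out = check_alt s
instance (s : String) (out : Bool) : Decidable (Spec_check s out) := by unfold Spec_check; infer_instance

-- ===== CLAIM (what is proved, stated in full; the proofs are below) =====
def Claim_equal_check : Prop := ∀ (s : String), Dom_check s → Spec_check s (check s)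

-- ===== LEMMAS AND PROOFS =====

lemma find_bne_eq (s p : String) : (PySem.Str.find s p != -1) = PySem.Str.isIn p s := by
  rw [Bool.eq_iff_iff, bne_iff_ne, PySem.Str.find_ne_neg_one_iff, PySem.Str.isIn_iff_infix]

lemma phase1_eq (s : String) :
    ((["late", "leaveearly"]).any (fun i => (["late", "leaveearly"]).any (fun j =>
      (PySem.Str.find s (i ++ " " ++ j) != -1) || (PySem.Str.find s (j ++ " " ++ i) != -1))))
    = (["late late", "late leaveearly", "leaveearly late", "leaveearly leaveearly"]).any
        (fun p => PySem.Str.isIn p s) := by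
  simp only [List.any_cons, List.any_nil, find_bne_eq, Bool.or_false]
  cases h1 : PySem.Str.isIn "late late" s <;>
  cases h2 : PySem.Str.isIn "late leaveearly" s <;>
  cases h3 : PySem.Str.isIn "leaveearly late" s <;>
  cases h4 : PySem.Str.isIn "leaveearly leaveearly" s <;>
  simp_all

lemma cnt_eq (logs : List String) (init : Int) :
    logs.foldl (fun c i => if i == "absent" then c + 1 else c) init
      = init + (logs.count "absent" : Int) := by
  induction logs generalizing init with
  | nil => simp
  | cons x xs ih =>
    simp only [List.foldl_cons, List.count_cons, ih]
    by_cases h : x = "absent" <;> simp [h, List.count_cons] <;> (try push_cast) <;> (try ring)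

lemma foldl_if_add {α : Type} (q : α → Prop) [DecidablePred q] (l : List α) (init : Int) :
    l.foldl (fun c j => if q j then c + 1 else c) init
      = init + (l.map (fun j => if q j then (1 : Int) else 0)).sum := by
  induction l generalizing init with
  | nil => simp
  | cons x xs ih =>
    simp only [List.foldl_cons, List.map_cons, List.sum_cons, ih]
    by_cases h : q x <;> simp [h] <;> (try ring)

lemma scanl_foldl (xs : List Int) (a : Int) (acc : List Int) :
    xs.foldl (fun acc b => acc ++ [PySem.List.pyGetD acc (-1) 0 + b]) (acc ++ [a])
      = acc ++ List.scanl (· + ·) a xs := by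
  induction xs generalizing acc a with
  | nil => simp
  | cons b xs ih =>
    rw [List.scanl_cons, List.foldl_cons, PySem.List.pyGetD_neg_one_append_singleton]
    have := ih (a + b) (acc ++ [a])
    simpa [List.append_assoc] using this

lemma scanl_getD (xs : List Int) (a : Int) (k : Nat) (hk : k ≤ xs.length) :
    (List.scanl (· + ·) a xs).getD k 0 = a + (xs.take k).sum := by
  induction xs generalizing a k with
  | nil =>
    have : k = 0 := by simpa using hk
    simp [this]
  | cons b xs ih =>
    cases k with
    | zero => simp
    | succ k =>
      rw [List.scanl_cons, List.getD_cons_succ, List.take_succ_cons, List.sum_cons,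
        ih (a + b) k (by simpa using hk)]
      ring

lemma window_eq (logs : List String) (i : Nat) (hi : i < logs.length) :
    ((PySem.List.pyRange (i : Int) (min ((i : Int) + 7) (logs.length : Int)) 1).foldl
      (fun c j => if PySem.List.pyGetD logs j "" ∈ ["absent", "leaveearly", "late"] then c + 1 else c)
      (0 : Int))
    = ((logs.map (fun w => if w ∈ ["absent", "leaveearly", "late"] then (1 : Int) else 0)).take
        (min (i + 7) logs.length)).sum
      - ((logs.map (fun w => if w ∈ ["absent", "leaveearly", "late"] then (1 : Int) else 0)).take i).sum := by
  set n := logs.length with hn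
  set w := min (i + 7) n with hwdef
  set bad := logs.map (fun w => if w ∈ ["absent", "leaveearly", "late"] then (1 : Int) else 0) with hbad
  have hiw : i ≤ w := by omega
  have hwn : w ≤ n := by omega
  have hmin : min ((i : Int) + 7) ((n : Nat) : Int) = ((w : Nat) : Int) := by
    rw [hwdef]; push_cast; omega
  rw [hmin, PySem.List.pyRange_one, List.foldl_map]
  have h1 : (((w : Nat) : Int) - (i : Int)).toNat = w - i := by omega
  rw [h1, foldl_if_add, zero_add]
  have hbadlen : bad.length = n := by simp [hbad, hn]
  have hmap : (List.range (w - i)).map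
      (fun k => if PySem.List.pyGetD logs ((i : Int) + (k : Nat)) "" ∈ ["absent", "leaveearly", "late"]
                then (1 : Int) else 0)
      = (bad.drop i).take (w - i) := by
    apply List.ext_getElem
    · simp [hbadlen]; omega
    · intro k hk1 hk2
      have hkw : k < w - i := by simpa using hk1
      have hkn : i + k < n := by omega
      have hcast : ((i : Int) + (k : Nat)) = (((i + k : Nat) : Nat) : Int) := by push_cast; ring
      simp only [List.getElem_map, List.getElem_range, List.getElem_take, List.getElem_drop]
      rw [hcast, PySem.List.pyGetD_natCast, List.getD_eq_getElem?_getD, List.getElem?_eq_getElem (by omega : i + k < logs.length)]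
      simp [hbad]
  rw [hmap]
  have htake : bad.take w = bad.take i ++ (bad.drop i).take (w - i) := by
    rw [show w = i + (w - i) by omega, List.take_add]
    simp
  rw [htake, List.sum_append]
  ring

lemma check_eq_alt (s : String) : check s = check_alt s := by
  unfold check check_alt
  rw [phase1_eq]
  by_cases hb : ((["late late", "late leaveearly", "leaveearly late", "leaveearly leaveearly"]).any
       (fun p => PySem.Str.isIn p s)) = true
  · rw [if_pos hb, if_pos hb]
  · rw [if_neg hb, if_neg hb]
    dsimp only
    set logs := PySem.Str.split₀ s with hlogs
    set n := logs.length with hn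
    set bad := logs.map (fun w => if w ∈ ["absent", "leaveearly", "late"] then (1 : Int) else 0) with hbad
    rw [cnt_eq logs 0, zero_add]
    have hcond : ((logs.count "absent" : Int) > 1) ↔ (PySem.List.count logs "absent" > 1) := by
      rw [PySem.List.count_eq]; omega
    by_cases hc : PySem.List.count logs "absent" > 1
    · rw [if_pos (hcond.mpr hc), if_pos hc]
    · rw [if_neg (fun h => hc (hcond.mp h)), if_neg hc]
      -- the window phase
      have hP : bad.foldl (fun acc b => acc ++ [PySem.List.pyGetD acc (-1) 0 + b]) [0]
          = List.scanl (· + ·) 0 bad := by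
        simpa using scanl_foldl bad 0 []
      rw [hP]
      have hbadlen : bad.length = n := by simp [hbad, hn]
      have hPget : ∀ k : Nat, k ≤ n →
          PySem.List.pyGetD (List.scanl (· + ·) (0 : Int) bad) (k : Int) 0 = (bad.take k).sum := by
        intro k hk
        rw [PySem.List.pyGetD_natCast, scanl_getD bad 0 k (by omega), zero_add]
      have key : ∀ i : Nat, i < n →
          ((PySem.List.pyRange (i : Int) (min ((i : Int) + 7) (n : Int)) 1).foldl
            (fun c j => if PySem.List.pyGetD logs j "" ∈ ["absent", "leaveearly", "late"] then c + 1 else c)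
            (0 : Int))
          = PySem.List.pyGetD (List.scanl (· + ·) (0 : Int) bad) (min ((i : Int) + 7) (n : Int)) 0
              - PySem.List.pyGetD (List.scanl (· + ·) (0 : Int) bad) (i : Int) 0 := by
        intro i hi
        have hw : min ((i : Int) + 7) ((n : Nat) : Int) = ((min (i + 7) n : Nat) : Int) := by
          push_cast; omega
        rw [window_eq logs i (by omega), hw, hPget (min (i + 7) n) (by omega), hPget i (by omega)]
      rw [Bool.eq_iff_iff]
      constructor
      · intro ht
        by_cases ha : ((PySem.List.pyRange 0 (n : Int) 1).any (fun i =>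
            decide ((PySem.List.pyRange i (min (i + 7) (n : Int)) 1).foldl
              (fun c j => if PySem.List.pyGetD logs j "" ∈ ["absent", "leaveearly", "late"] then c + 1 else c)
              (0 : Int) > 3))) = true
        · rw [if_pos ha] at ht; exact absurd ht (by simp)
        · rw [Bool.not_eq_true, List.any_eq_false] at ha
          rw [List.all_eq_true]
          intro i hi
          rw [List.mem_range] at hi
          have h1 := ha ((i : Int)) (by rw [PySem.List.mem_pyRange_one]; omega)
          simp only [decide_eq_true_eq, not_lt] at h1
          rw [key i hi] at h1
          simp only [decide_eq_true_eq]
          exact h1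
      · intro ht
        rw [List.all_eq_true] at ht
        have ha : ((PySem.List.pyRange 0 (n : Int) 1).any (fun i =>
            decide ((PySem.List.pyRange i (min (i + 7) (n : Int)) 1).foldl
              (fun c j => if PySem.List.pyGetD logs j "" ∈ ["absent", "leaveearly", "late"] then c + 1 else c)
              (0 : Int) > 3))) = false := by
          rw [List.any_eq_false]
          intro j hj
          rw [PySem.List.mem_pyRange_one] at hj
          have hjn : j.toNat < n := by omega
          have hB := ht j.toNat (List.mem_range.mpr hjn)
          simp only [decide_eq_true_eq, not_lt]
          rw [show j = ((j.toNat : Nat) : Int) by omega, key j.toNat hjn]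
          exact of_decide_eq_true hB
        rw [if_neg (by rw [ha]; exact Bool.false_ne_true)]

-- ===== VERDICT (by name: the statement is the Claim_ definition above) =====
theorem check_spec : Claim_equal_check := by
  intro s _
  unfold Spec_check
  exact check_eq_alt s
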